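-- pv_equiv track=rewrite | github.com/AdelTechCrafter/CPA2020 | LabelPropagation/GraphGenerator.py | generatecommunities
-- ===== SOURCE A (Python) =====
-- def generatecommunities(g):
--     color_map=[]
--     for node in g:
--         if node//100 < 1:
--             color_map.append('blue')
--         elif node//100<2:
--             color_map.append('green')
--         elif(node//100<3):
--             color_map.append('red')
--         else:
--             color_map.append('purple')
--     return color_map
-- ===== SOURCE B (Python) =====
-- def generatecommunities(g):
--     # staged refinement: start all 'purple', then overwrite in three passes,
--     # tighter thresholds last so they win
--     color_map = ['purple'] * len(g)
--     for limit, color in ((3, 'red'), (2, 'green'), (1, 'blue')):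
--         for i, node in enumerate(g):
--             if node // 100 < limit:
--                 color_map[i] = color
--     return color_map
-- ===== Notes on version B (the rewrite author's own statement) =====
-- stated objective: alternative
-- what changed: Replaces the single-pass four-way if/elif cascade with a staged-overwrite scheme: the output starts as all 'purple' and three successive full passes overwrite entries whose node//100 is below 3, 2 and 1 with 'red', 'green' and 'blue' respectively.
import Mathlib
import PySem

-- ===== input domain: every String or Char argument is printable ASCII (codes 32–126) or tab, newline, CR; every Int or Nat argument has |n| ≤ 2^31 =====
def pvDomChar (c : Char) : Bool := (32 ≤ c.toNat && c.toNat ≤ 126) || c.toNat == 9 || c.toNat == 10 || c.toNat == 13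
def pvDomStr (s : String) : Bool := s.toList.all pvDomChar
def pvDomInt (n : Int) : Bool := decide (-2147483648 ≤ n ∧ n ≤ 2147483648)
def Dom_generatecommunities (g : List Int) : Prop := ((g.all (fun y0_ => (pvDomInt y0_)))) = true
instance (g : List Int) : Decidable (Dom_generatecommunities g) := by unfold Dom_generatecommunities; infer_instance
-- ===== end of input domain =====

-- B replaces A's single-pass if/elif cascade by staged overwrite passes (all 'purple',
-- then 'red'/'green'/'blue' passes); objective: alternative algorithm, same cost.

-- ===== PORT A =====
def generatecommunities (g : List Int) : List String :=
  g.foldl (fun color_map node =>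
    if PySem.Int.floordiv node 100 < 1 then color_map ++ ["blue"]
    else if PySem.Int.floordiv node 100 < 2 then color_map ++ ["green"]
    else if PySem.Int.floordiv node 100 < 3 then color_map ++ ["red"]
    else color_map ++ ["purple"]) []

-- ===== PORT B =====
-- one overwrite pass of Source B: for i,node in enumerate(g): if node//100 < limit: out[i] = color
def gcPass (limit : Int) (color : String) (g : List Int) (out : List String) : List String :=
  List.zipWith (fun node c => if PySem.Int.floordiv node 100 < limit then color else c) g out

def generatecommunities_alt (g : List Int) : List String :=
  [((3 : Int), "red"), ((2 : Int), "green"), ((1 : Int), "blue")].foldl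
    (fun out p => gcPass p.1 p.2 g out) (List.replicate g.length "purple")

-- ===== PRECONDITION & SPEC =====
def Spec_generatecommunities (g : List Int) (out : List String) : Prop := out = generatecommunities_alt g
instance (g : List Int) (out : List String) : Decidable (Spec_generatecommunities g out) := by unfold Spec_generatecommunities; infer_instance

-- ===== CLAIM (what is proved, stated in full; the proofs are below) =====
def Claim_equal_generatecommunities : Prop := ∀ (g : List Int), Dom_generatecommunities g → Spec_generatecommunities g (generatecommunities g)

-- ===== LEMMAS AND PROOFS =====

-- the per-node cascade value of A
def gcCascade (node : Int) : String :=
  if PySem.Int.floordiv node 100 < 1 then "blue"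
  else if PySem.Int.floordiv node 100 < 2 then "green"
  else if PySem.Int.floordiv node 100 < 3 then "red"
  else "purple"

-- A's foldl with accumulator equals acc ++ map gcCascade
theorem gc_fold (g : List Int) (acc : List String) :
    g.foldl (fun color_map node =>
      if PySem.Int.floordiv node 100 < 1 then color_map ++ ["blue"]
      else if PySem.Int.floordiv node 100 < 2 then color_map ++ ["green"]
      else if PySem.Int.floordiv node 100 < 3 then color_map ++ ["red"]
      else color_map ++ ["purple"]) acc
    = acc ++ g.map gcCascade := by
  induction g generalizing acc with
  | nil => simp
  | cons node t ih =>
    simp only [List.foldl_cons, List.map_cons]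
    rw [ih]
    unfold gcCascade
    split_ifs <;> simp

-- B's three staged passes equal the per-node cascade map
theorem gc_alt_eq_map (g : List Int) : generatecommunities_alt g = g.map gcCascade := by
  unfold generatecommunities_alt
  simp only [List.foldl_cons, List.foldl_nil]
  induction g with
  | nil => simp [gcPass]
  | cons node t ih =>
    simp only [List.length_cons, List.replicate_succ, gcPass, List.zipWith_cons_cons,
      List.map_cons] at ih ⊢
    refine congrArg₂ List.cons ?_ ih
    unfold gcCascade
    set q := PySem.Int.floordiv node 100
    split_ifs <;> simp_all

-- ===== VERDICT (by name: the statement is the Claim_ definition above) =====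
theorem generatecommunities_spec : Claim_equal_generatecommunities := by
  intro g _
  unfold Spec_generatecommunities generatecommunities
  rw [gc_alt_eq_map, gc_fold]
  simp
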